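-- pv_equiv track=rewrite | github.com/apprenti-org/curriculum-tracking | scripts/generate-course-overview.py | match_folder_json_ids
-- ===== SOURCE A (Python) =====
-- def match_folder_json_ids(folders, json_ids):
--     """Pair course-folder names with courses.json ids.
--
--     Deterministic: result depends only on input values, never on set-iteration
--     order or PYTHONHASHSEED. Addresses curriculum-tracking#53, where the prior
--     set-iteration + first-match approach produced different mappings across
--     runs for name families like the Coding Booster courses.
--
--     Scoring (higher = better):
--       1000  exact match (folder_id == json_id)
--        500  de-hyphenated substring match in either direction
--        100 * word_overlap_count  (only counted when overlap >= 2)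
--          0  otherwise (treated as no match)
--
--     Assignment is greedy by descending score, with alphabetical tiebreakers;
--     each folder and each json_id is claimed at most once.
--
--     Returns (folder_to_json, json_to_folder) dicts.
--     """
--     json_set = set(json_ids)
--     candidates = []
--
--     for fid in folders:
--         f_words = set(fid.split('-'))
--         f_norm = fid.replace('-', '')
--         for jid in json_ids:
--             if fid == jid:
--                 score = 1000
--             else:
--                 j_norm = jid.replace('-', '')
--                 if f_norm in j_norm or j_norm in f_norm:
--                     score = 500
--                 else:
--                     j_words = set(jid.split('-'))
--                     overlap = len(f_words & j_words)
--                     score = 100 * overlap if overlap >= 2 else 0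
--             if score > 0:
--                 candidates.append((score, fid, jid))
--
--     # Highest score first; then alphabetical for deterministic tiebreaking.
--     candidates.sort(key=lambda c: (-c[0], c[1], c[2]))
--
--     folder_to_json = {}
--     json_to_folder = {}
--     for _score, fid, jid in candidates:
--         if fid in folder_to_json or jid in json_to_folder:
--             continue
--         folder_to_json[fid] = jid
--         json_to_folder[jid] = fid
--
--     return folder_to_json, json_to_folder
-- ===== SOURCE B (Python) =====
-- def match_folder_json_ids(folders, json_ids):
--     """Selection-based greedy: no candidate list, no sort. Each round rescans
--     the still-unclaimed folder/json_id pairs for the single best match (highest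
--     score, then alphabetically smallest) and claims it; stops when no
--     positive-score pair is left."""
--
--     def score(fid, jid):
--         if fid == jid:
--             return 1000
--         f_norm = fid.replace('-', '')
--         j_norm = jid.replace('-', '')
--         if f_norm in j_norm or j_norm in f_norm:
--             return 500
--         overlap = len(set(fid.split('-')) & set(jid.split('-')))
--         return 100 * overlap if overlap >= 2 else 0
--
--     folder_to_json = {}
--     json_to_folder = {}
--     for _ in range(len(folders)):  # each round claims a new folder name
--         best = None
--         for fid in folders:
--             if fid in folder_to_json:
--                 continue
--             for jid in json_ids:
--                 if jid in json_to_folder: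
--                     continue
--                 s = score(fid, jid)
--                 if s > 0:
--                     key = (-s, fid, jid)
--                     if best is None or key < best:
--                         best = key
--         if best is None:
--             break
--         _, fid, jid = best
--         folder_to_json[fid] = jid
--         json_to_folder[jid] = fid
--     return folder_to_json, json_to_folder
-- ===== Notes on version B (the rewrite author's own statement) =====
-- stated objective: alternative
-- what changed: B never materialises or sorts a candidate list: it is a selection loop that each round rescans the still-unclaimed folder/json_id pairs, picks the single best (highest score, then alphabetically smallest (fid, jid)) and claims it, stopping when no positive-score pair remains; this yields the same assignments in the same insertion order because greedy-by-sorted-order equals repeated best-extraction.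
import Mathlib
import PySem

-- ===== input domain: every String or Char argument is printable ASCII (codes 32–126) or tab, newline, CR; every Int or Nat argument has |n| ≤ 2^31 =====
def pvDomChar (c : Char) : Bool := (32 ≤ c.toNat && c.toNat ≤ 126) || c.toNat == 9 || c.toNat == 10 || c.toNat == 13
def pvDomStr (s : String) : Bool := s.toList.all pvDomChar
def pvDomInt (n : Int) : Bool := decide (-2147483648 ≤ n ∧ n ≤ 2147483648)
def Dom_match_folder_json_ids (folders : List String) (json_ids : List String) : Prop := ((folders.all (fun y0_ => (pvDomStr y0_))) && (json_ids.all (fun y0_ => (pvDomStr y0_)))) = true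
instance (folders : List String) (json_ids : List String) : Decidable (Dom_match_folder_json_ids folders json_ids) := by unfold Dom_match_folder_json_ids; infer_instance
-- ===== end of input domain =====

-- B replaces A's build-candidate-list + global sort + single sweep by a selection loop that never
-- sorts: each round rescans the unclaimed folder/json_id pairs for the single best match and claims
-- it (alternative algorithm; slower in the worst case, no sort or candidate list materialised).


-- ===== PORT A =====
-- Python's tuple sort key (-score, fid, jid) is ported as a lexicographic (Prod.Lex) key:
-- Python tuple comparison is exactly the lexicographic order on the components.
def pvKey3 (c : Int × String × String) : ℤ ×ₗ (String ×ₗ String) :=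
  toLex (-c.1, toLex (c.2.1, c.2.2))

-- Port of A. Notes on exactness: A's 'json_set = set(json_ids)' is built but never used, so it
-- is omitted; fid.split('-') has a non-empty separator, so split? is always 'some' and the
-- '.getD []' default is never taken; the final dicts are returned as their assoc lists (.items).
def match_folder_json_ids (folders : List String) (json_ids : List String) : (List (String × String)) × (List (String × String)) :=
  let candidates : List (Int × String × String) := folders.foldl (fun acc fid =>
    let f_words : PySem.Set String := PySem.Set.ofList ((PySem.Str.split? fid "-").getD [])
    let f_norm := PySem.Str.replace fid "-" ""
    json_ids.foldl (fun acc jid =>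
      let score : Int :=
        if fid = jid then 1000
        else
          let j_norm := PySem.Str.replace jid "-" ""
          if PySem.Str.isIn f_norm j_norm || PySem.Str.isIn j_norm f_norm then 500
          else
            let j_words : PySem.Set String := PySem.Set.ofList ((PySem.Str.split? jid "-").getD [])
            let overlap := PySem.Set.len (PySem.Set.inter f_words j_words)
            if overlap ≥ 2 then 100 * overlap else 0
      if score > 0 then acc ++ [(score, fid, jid)] else acc) acc) []
  let sortedC := PySem.List.sorted candidates pvKey3
  let st := sortedC.foldl
    (fun (st : PySem.Dict String String × PySem.Dict String String) c =>
      if st.1.contains c.2.1 || st.2.contains c.2.2 then st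
      else (st.1.insert c.2.1 c.2.2, st.2.insert c.2.2 c.2.1))
    (PySem.Dict.empty, PySem.Dict.empty)
  (st.1.items, st.2.items)

-- ===== PORT B =====
-- B's helper score (same exactness notes as for A's inline scoring).
def pvScore (fid jid : String) : Int :=
  if fid = jid then 1000
  else
    let f_norm := PySem.Str.replace fid "-" ""
    let j_norm := PySem.Str.replace jid "-" ""
    if PySem.Str.isIn f_norm j_norm || PySem.Str.isIn j_norm f_norm then 500
    else
      let overlap := PySem.Set.len (PySem.Set.inter
        (PySem.Set.ofList ((PySem.Str.split? fid "-").getD []))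
        (PySem.Set.ofList ((PySem.Str.split? jid "-").getD [])))
      if overlap ≥ 2 then 100 * overlap else 0

-- Python's tuple comparison 'key < best' on (-s, fid, jid), component-lexicographic.
def pvTupLt (a b : Int × String × String) : Bool :=
  decide (a.1 < b.1) || (a.1 == b.1 &&
    (decide (a.2.1 < b.2.1) || (a.2.1 == b.2.1 && decide (a.2.2 < b.2.2))))

-- One round of B: the double 'for' with 'continue' on claimed ids, keeping the smallest key.
def pvBestRound (folders json_ids : List String)
    (st : PySem.Dict String String × PySem.Dict String String) :
    Option (Int × String × String) :=
  folders.foldl (fun best fid =>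
    if st.1.contains fid then best
    else json_ids.foldl (fun best jid =>
      if st.2.contains jid then best
      else
        let s := pvScore fid jid
        if s > 0 then
          let key := (-s, fid, jid)
          match best with
          | none => some key
          | some b => if pvTupLt key b then some key else some b
        else best) best) none

-- B's outer 'for _ in range(len(folders))' with 'break' when no pair scored: fuel recursion
-- on the round count (exact: each Python iteration either claims the found best pair or breaks).
def pvLoop (folders json_ids : List String) :
    Nat → PySem.Dict String String × PySem.Dict String String →
    PySem.Dict String String × PySem.Dict String String
  | 0, st => st
  | fuel + 1, st =>
    match pvBestRound folders json_ids st with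
    | none => st
    | some (_, fid, jid) =>
        pvLoop folders json_ids fuel (st.1.insert fid jid, st.2.insert jid fid)

def match_folder_json_ids_alt (folders : List String) (json_ids : List String) : (List (String × String)) × (List (String × String)) :=
  let st := pvLoop folders json_ids folders.length (PySem.Dict.empty, PySem.Dict.empty)
  (st.1.items, st.2.items)

-- ===== PRECONDITION & SPEC =====
def Spec_match_folder_json_ids (folders : List String) (json_ids : List String) (out : (List (String × String)) × (List (String × String))) : Prop := out = match_folder_json_ids_alt folders json_ids
instance (folders : List String) (json_ids : List String) (out : (List (String × String)) × (List (String × String))) : Decidable (Spec_match_folder_json_ids folders json_ids out) := by unfold Spec_match_folder_json_ids; infer_instance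

-- ===== CLAIM (what is proved, stated in full; the proofs are below) =====
def Claim_equal_match_folder_json_ids : Prop := ∀ (folders : List String) (json_ids : List String), Dom_match_folder_json_ids folders json_ids → Spec_match_folder_json_ids folders json_ids (match_folder_json_ids folders json_ids)

-- ===== LEMMAS AND PROOFS =====

-- The common pair stream and the embeddings used to relate the two programs.
def pvKeyOf (p : String × String) : Int := pvScore p.1 p.2

def pvPairs (folders json_ids : List String) : List (String × String) :=
  folders.flatMap (fun fid =>
    (json_ids.filter (fun jid => decide (0 < pvScore fid jid))).map (fun jid => (fid, jid)))

def pvEmb (p : String × String) : Int × String × String := (pvKeyOf p, p.1, p.2)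

-- the key triple B stores for a pair, and the order both programs rank keys by
def pvKeyNeg (p : String × String) : Int × String × String := (-(pvScore p.1 p.2), p.1, p.2)

def pvKeyId (c : Int × String × String) : ℤ ×ₗ (String ×ₗ String) :=
  toLex (c.1, toLex (c.2.1, c.2.2))

-- the greedy step function of A's sweep
def pvStepA (st : PySem.Dict String String × PySem.Dict String String)
    (c : Int × String × String) : PySem.Dict String String × PySem.Dict String String :=
  if st.1.contains c.2.1 || st.2.contains c.2.2 then st
  else (st.1.insert c.2.1 c.2.2, st.2.insert c.2.2 c.2.1)

-- acceptability of a pair under the current claim state, and B's min-accumulating step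
def pvAcc (st : PySem.Dict String String × PySem.Dict String String) (p : String × String) : Bool :=
  !st.1.contains p.1 && !st.2.contains p.2

def pvMinStep (best : Option (Int × String × String)) (k : Int × String × String) :
    Option (Int × String × String) :=
  match best with
  | none => some k
  | some b => if pvTupLt k b then some k else some b

theorem pvScore_nonneg (fid jid : String) : 0 ≤ pvScore fid jid := by
  unfold pvScore
  dsimp only
  split_ifs with h1 h2 h3 <;> omega

theorem pvTupLt_iff (a b : Int × String × String) :
    pvTupLt a b = true ↔ pvKeyId a < pvKeyId b := by
  unfold pvTupLt pvKeyId
  rw [Prod.Lex.toLex_lt_toLex, Prod.Lex.toLex_lt_toLex]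
  simp

theorem pvKeyId_inj (a b : Int × String × String) (h : pvKeyId a = pvKeyId b) : a = b := by
  unfold pvKeyId at h
  simp only [toLex_inj, Prod.mk.injEq] at h
  obtain ⟨h1, h2, h3⟩ := h
  exact Prod.ext h1 (Prod.ext h2 h3)

theorem pvCands_eq (folders json_ids : List String) :
    folders.foldl (fun acc fid =>
      let f_words : PySem.Set String := PySem.Set.ofList ((PySem.Str.split? fid "-").getD [])
      let f_norm := PySem.Str.replace fid "-" ""
      json_ids.foldl (fun acc jid =>
        let score : Int :=
          if fid = jid then 1000
          else
            let j_norm := PySem.Str.replace jid "-" ""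
            if PySem.Str.isIn f_norm j_norm || PySem.Str.isIn j_norm f_norm then 500
            else
              let j_words : PySem.Set String := PySem.Set.ofList ((PySem.Str.split? jid "-").getD [])
              let overlap := PySem.Set.len (PySem.Set.inter f_words j_words)
              if overlap ≥ 2 then 100 * overlap else 0
        if score > 0 then acc ++ [(score, fid, jid)] else acc) acc)
      ([] : List (Int × String × String))
    = (pvPairs folders json_ids).map pvEmb := by
  refine (PySem.List.foldl_congr_mem folders _
      (fun acc fid => acc ++ ((json_ids.filter (fun jid => decide (0 < pvScore fid jid))).map
        (fun jid => pvEmb (fid, jid)))) []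
      (fun acc fid _ => PySem.List.foldl_append_ite
        (fun jid => 0 < pvScore fid jid) (fun jid => pvEmb (fid, jid)) json_ids acc)).trans ?_
  rw [PySem.List.foldl_append_eq_flatMap]
  simp only [pvPairs, List.map_flatMap, List.map_map]
  rfl

theorem pvMem_pvPairs (folders json_ids : List String) (p : String × String) :
    p ∈ pvPairs folders json_ids ↔
      p.1 ∈ folders ∧ p.2 ∈ json_ids ∧ 0 < pvScore p.1 p.2 := by
  unfold pvPairs
  simp only [List.mem_flatMap, List.mem_map, List.mem_filter, decide_eq_true_eq]
  constructor
  · rintro ⟨fid, hf, jid, ⟨hj, hs⟩, rfl⟩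
    exact ⟨hf, hj, hs⟩
  · rintro ⟨hf, hj, hs⟩
    exact ⟨p.1, hf, p.2, ⟨hj, hs⟩, rfl⟩

-- pvBestRound is the pvMinStep-fold over the keys of the still-acceptable pairs.
theorem pvBestRound_eq (folders json_ids : List String)
    (st : PySem.Dict String String × PySem.Dict String String) :
    pvBestRound folders json_ids st
    = (((pvPairs folders json_ids).filter (pvAcc st)).map pvKeyNeg).foldl pvMinStep none := by
  unfold pvBestRound
  have inner : ∀ (fid : String) (best : Option (Int × String × String)),
      st.1.contains fid = false →
      json_ids.foldl (fun best jid =>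
        if st.2.contains jid then best
        else
          let s := pvScore fid jid
          if s > 0 then
            let key := (-s, fid, jid)
            match best with
            | none => some key
            | some b => if pvTupLt key b then some key else some b
          else best) best
      = ((json_ids.filter (fun jid => !st.2.contains jid && decide (0 < pvScore fid jid))).map
          (fun jid => pvKeyNeg (fid, jid))).foldl pvMinStep best := by
    intro fid best _
    rw [List.foldl_map]
    rw [← PySem.List.foldl_if_eq_foldl_filter
      (fun jid => !st.2.contains jid && decide (0 < pvScore fid jid))
      (fun best jid => pvMinStep best (pvKeyNeg (fid, jid))) json_ids best]
    refine PySem.List.foldl_congr_mem json_ids _ _ best ?_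
    intro acc jid _
    by_cases hc : st.2.contains jid = true
    · simp [hc]
    · simp only [Bool.not_eq_true] at hc
      by_cases hs : (0 : Int) < pvScore fid jid
      · simp [hc, hs, pvMinStep, pvKeyNeg]
      · have h0 := pvScore_nonneg fid jid
        have hz : pvScore fid jid = 0 := by omega
        simp [hc, hz]
  have outer : folders.foldl (fun best fid =>
      if st.1.contains fid then best
      else json_ids.foldl (fun best jid =>
        if st.2.contains jid then best
        else
          let s := pvScore fid jid
          if s > 0 then
            let key := (-s, fid, jid)
            match best with
            | none => some key
            | some b => if pvTupLt key b then some key else some b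
          else best) best) none
      = (folders.flatMap (fun fid =>
          if st.1.contains fid then []
          else ((json_ids.filter (fun jid => !st.2.contains jid && decide (0 < pvScore fid jid))).map
            (fun jid => pvKeyNeg (fid, jid))))).foldl pvMinStep none := by
    rw [List.foldl_flatMap]
    refine PySem.List.foldl_congr_mem folders _ _ none ?_
    intro best fid _
    by_cases hc : st.1.contains fid = true
    · simp [hc]
    · simp only [Bool.not_eq_true] at hc
      rw [inner fid best hc]
      simp [hc]
  rw [outer]
  congr 1
  rw [pvPairs, List.filter_flatMap, List.map_flatMap]
  refine List.flatMap_congr ?_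
  intro fid _
  by_cases hc : st.1.contains fid = true
  · have : ∀ jid, pvAcc st (fid, jid) = false := by
      intro jid; simp [pvAcc, hc]
    simp [hc, List.filter_map, Function.comp_def, this]
  · simp only [Bool.not_eq_true] at hc
    rw [List.filter_map, List.filter_filter, List.map_map]
    simp only [hc, if_neg (by simp : ¬ false = true)]
    congr 1
    refine List.filter_congr ?_
    intro jid _
    simp [pvAcc, hc, Bool.and_comm]

theorem pvMinStep_isSome (b : Option (Int × String × String)) (k : Int × String × String) :
    (pvMinStep b k).isSome := by
  cases b with
  | none => rfl
  | some v => simp only [pvMinStep]; split <;> rfl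

theorem pvMinStep_cases (b : Option (Int × String × String)) (k : Int × String × String) :
    pvMinStep b k = some k ∨ ∃ v, b = some v ∧ pvMinStep b k = some v := by
  cases b with
  | none => exact Or.inl rfl
  | some v =>
    simp only [pvMinStep]
    by_cases h : pvTupLt k v = true
    · exact Or.inl (by simp [h])
    · exact Or.inr ⟨v, rfl, by simp [h]⟩

theorem pvMinStep_le (b : Option (Int × String × String)) (k m : Int × String × String)
    (h : pvMinStep b k = some m) :
    pvKeyId m ≤ pvKeyId k ∧ ∀ v, b = some v → pvKeyId m ≤ pvKeyId v := by
  cases b with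
  | none =>
    cases h
    exact ⟨le_refl _, by simp⟩
  | some v =>
    simp only [pvMinStep] at h
    by_cases hlt : pvTupLt k v = true
    · rw [if_pos hlt] at h
      cases h
      refine ⟨le_refl _, ?_⟩
      rintro w ⟨rfl⟩
      exact le_of_lt ((pvTupLt_iff _ _).mp hlt)
    · rw [if_neg hlt] at h
      cases h
      have : ¬ pvKeyId k < pvKeyId m := fun hh => hlt ((pvTupLt_iff _ _).mpr hh)
      refine ⟨le_of_not_gt this, ?_⟩
      rintro w ⟨rfl⟩
      exact le_refl _

theorem pvMinFold_isSome (l : List (Int × String × String))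
    (b : Option (Int × String × String)) (h : b.isSome) :
    (l.foldl pvMinStep b).isSome := by
  induction l generalizing b with
  | nil => exact h
  | cons k t ih =>
    rw [List.foldl_cons]
    exact ih _ (pvMinStep_isSome b k)

theorem pvMinFold_mem (l : List (Int × String × String))
    (b : Option (Int × String × String)) (m : Int × String × String)
    (h : l.foldl pvMinStep b = some m) : b = some m ∨ m ∈ l := by
  induction l generalizing b with
  | nil => exact Or.inl h
  | cons k t ih =>
    rw [List.foldl_cons] at h
    rcases ih _ h with h' | h'
    · rcases pvMinStep_cases b k with hk | ⟨v, hv, hvk⟩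
      · rw [hk] at h'
        cases h'
        exact Or.inr List.mem_cons_self
      · rw [hvk] at h'
        cases h'
        exact Or.inl hv
    · exact Or.inr (List.mem_cons_of_mem _ h')

theorem pvMinFold_le (l : List (Int × String × String))
    (b : Option (Int × String × String)) (m : Int × String × String)
    (h : l.foldl pvMinStep b = some m) :
    (∀ x ∈ l, pvKeyId m ≤ pvKeyId x) ∧ (∀ v, b = some v → pvKeyId m ≤ pvKeyId v) := by
  induction l generalizing b with
  | nil =>
    rw [List.foldl_nil] at h
    refine ⟨by simp, ?_⟩
    intro v hv
    rw [h] at hv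
    cases hv
    exact le_refl _
  | cons k t ih =>
    rw [List.foldl_cons] at h
    obtain ⟨h1, h2⟩ := ih _ h
    obtain ⟨w, hw⟩ := Option.isSome_iff_exists.mp (pvMinStep_isSome b k)
    have hmw : pvKeyId m ≤ pvKeyId w := h2 w hw
    obtain ⟨hwk, hwb⟩ := pvMinStep_le b k w hw
    refine ⟨?_, ?_⟩
    · intro x hx
      rcases List.mem_cons.mp hx with rfl | hx
      · exact le_trans hmw hwk
      · exact h1 x hx
    · intro v hv
      exact le_trans hmw (hwb v hv)

theorem pvFilterLen_mono (p q : String → Bool) (h : ∀ x, q x = true → p x = true)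
    (l : List String) : (l.filter q).length ≤ (l.filter p).length := by
  induction l with
  | nil => simp
  | cons x t ih =>
    by_cases hq : q x = true
    · simp [hq, h x hq, ih]
    · simp only [Bool.not_eq_true] at hq
      rw [List.filter_cons, hq]
      cases hp : p x <;> simp [hp] <;> omega

theorem pvFilterLen_lt (p q : String → Bool) (h : ∀ x, q x = true → p x = true)
    (l : List String) (a : String) (ha : a ∈ l) (hpa : p a = true) (hqa : q a = false) :
    (l.filter q).length < (l.filter p).length := by
  induction l with
  | nil => simp at ha
  | cons x t ih =>
    rcases List.mem_cons.mp ha with rfl | ha'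
    · rw [List.filter_cons, List.filter_cons, hpa, hqa]
      simpa using Nat.lt_succ_of_le (pvFilterLen_mono p q h t)
    · have := ih ha'
      by_cases hq : q x = true
      · simp only [List.filter_cons, hq, h x hq, if_true]
        simpa using this
      · simp only [Bool.not_eq_true] at hq
        rw [List.filter_cons, hq]
        cases hp : p x <;> simp [hp] <;> omega

theorem pvKey3_emb (p : String × String) : pvKey3 (pvEmb p) = pvKeyId (pvKeyNeg p) := rfl

-- A's sorted sweep over the remaining candidate list equals B's selection loop, given that the
-- list is key-sorted, consists of embedded scored pairs, and still carries every acceptable pair.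
theorem pvSel_eq (folders json_ids : List String) :
    ∀ (L : List (Int × String × String)) (fuel : Nat)
      (st : PySem.Dict String String × PySem.Dict String String),
      L.Pairwise (fun a b => pvKey3 a ≤ pvKey3 b) →
      (∀ c ∈ L, ∃ p ∈ pvPairs folders json_ids, c = pvEmb p) →
      (∀ p ∈ pvPairs folders json_ids, pvAcc st p = true → pvEmb p ∈ L) →
      (folders.dedup.filter (fun f => !st.1.contains f)).length ≤ fuel →
      L.foldl pvStepA st = pvLoop folders json_ids fuel st := by
  intro L
  induction L with
  | nil =>
    intro fuel st _ _ hacc _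
    have hnone : pvBestRound folders json_ids st = none := by
      rw [pvBestRound_eq]
      have : (pvPairs folders json_ids).filter (pvAcc st) = [] := by
        rw [List.filter_eq_nil_iff]
        intro p hp hpa
        simpa using hacc p hp hpa
      rw [this]
      rfl
    cases fuel with
    | zero => rfl
    | succ f => simp [pvLoop, hnone]
  | cons c rest ih =>
    intro fuel st hsort hex hacc hfuel
    obtain ⟨hhead, htail⟩ := List.pairwise_cons.mp hsort
    by_cases hc : (st.1.contains c.2.1 || st.2.contains c.2.2) = true
    · -- head not acceptable: A skips it, and it was not in B's scan either
      rw [List.foldl_cons]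
      have hskip : pvStepA st c = st := by simp [pvStepA, hc]
      rw [hskip]
      refine ih fuel st htail (fun x hx => hex x (List.mem_cons_of_mem _ hx)) ?_ hfuel
      intro p hp hpa
      rcases List.mem_cons.mp (hacc p hp hpa) with he | hm
      · exfalso
        have h1 : c.2.1 = p.1 := by rw [← he]; rfl
        have h2 : c.2.2 = p.2 := by rw [← he]; rfl
        rw [h1, h2] at hc
        simp only [pvAcc, Bool.and_eq_true, Bool.not_eq_true'] at hpa
        rw [hpa.1, hpa.2] at hc
        simp at hc
      · exact hm
    · -- head acceptable: it is exactly the best pair B's rescan finds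
      obtain ⟨p0, hp0, hcp0⟩ := hex c List.mem_cons_self
      subst hcp0
      simp only [Bool.or_eq_true, not_or, Bool.not_eq_true] at hc
      have hc1 : st.1.contains p0.1 = false := hc.1
      have hc2 : st.2.contains p0.2 = false := hc.2
      have hp0a : pvAcc st p0 = true := by
        simp [pvAcc, hc1, hc2]
      have hbest : pvBestRound folders json_ids st = some (pvKeyNeg p0) := by
        rw [pvBestRound_eq]
        have hmem : pvKeyNeg p0 ∈ ((pvPairs folders json_ids).filter (pvAcc st)).map pvKeyNeg :=
          List.mem_map_of_mem (List.mem_filter.mpr ⟨hp0, hp0a⟩)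
        obtain ⟨m, hm⟩ : ∃ m, (((pvPairs folders json_ids).filter (pvAcc st)).map pvKeyNeg).foldl
            pvMinStep none = some m := by
          cases hR : ((pvPairs folders json_ids).filter (pvAcc st)).map pvKeyNeg with
          | nil => rw [hR] at hmem; simp at hmem
          | cons k t =>
            have := pvMinFold_isSome t (some k) rfl
            rw [List.foldl_cons]
            exact Option.isSome_iff_exists.mp (by simpa [pvMinStep] using this)
        rw [hm]
        -- m is the minimum key; the head's key is a lower bound of all keys; so they are equal
        have hmmem : m ∈ ((pvPairs folders json_ids).filter (pvAcc st)).map pvKeyNeg := by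
          rcases pvMinFold_mem _ _ _ hm with h' | h'
          · cases h'
          · exact h'
        obtain ⟨q, hq, hqm⟩ := List.mem_map.mp hmmem
        obtain ⟨hqp, hqa⟩ := List.mem_filter.mp hq
        have hle1 : pvKeyId m ≤ pvKeyId (pvKeyNeg p0) :=
          (pvMinFold_le _ _ _ hm).1 _ hmem
        have hle2 : pvKeyId (pvKeyNeg p0) ≤ pvKeyId m := by
          rcases List.mem_cons.mp (hacc q hqp hqa) with he | hmrest
          · rw [← hqm, ← pvKey3_emb, ← pvKey3_emb, he]
          · rw [← hqm, ← pvKey3_emb, ← pvKey3_emb]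
            exact hhead _ hmrest
        exact congrArg some (pvKeyId_inj m (pvKeyNeg p0) (le_antisymm hle1 hle2))
      cases fuel with
      | zero =>
        exfalso
        have hmemd : p0.1 ∈ folders.dedup.filter (fun f => !st.1.contains f) := by
          refine List.mem_filter.mpr ⟨List.mem_dedup.mpr ?_, by simp [hc1]⟩
          exact ((pvMem_pvPairs folders json_ids p0).mp hp0).1
        have : 0 < (folders.dedup.filter (fun f => !st.1.contains f)).length :=
          List.length_pos_of_mem hmemd
        omega
      | succ f =>
        have hloop : pvLoop folders json_ids (f + 1) st
            = pvLoop folders json_ids f (st.1.insert p0.1 p0.2, st.2.insert p0.2 p0.1) := by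
          rw [pvLoop, hbest]
          rfl
        rw [hloop, List.foldl_cons]
        have hstep : pvStepA st (pvEmb p0)
            = (st.1.insert p0.1 p0.2, st.2.insert p0.2 p0.1) := by
          simp [pvStepA, pvEmb, hc1, hc2]
        rw [hstep]
        refine ih f _ htail (fun x hx => hex x (List.mem_cons_of_mem _ hx)) ?_ ?_
        · -- every pair still acceptable after claiming (p0.1, p0.2) was acceptable before,
          -- and is not p0 itself, hence sits in the tail
          intro p hp hpa
          simp only [pvAcc, Bool.and_eq_true, Bool.not_eq_true',
            PySem.Dict.contains_insert] at hpa
          obtain ⟨h1, h2⟩ := hpa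
          simp only [Bool.or_eq_false_iff, beq_eq_false_iff_ne] at h1 h2
          have hpa' : pvAcc st p = true := by simp [pvAcc, h1.2, h2.2]
          rcases List.mem_cons.mp (hacc p hp hpa') with he | hm
          · exfalso
            have : p.1 = p0.1 := by
              have := congrArg (fun c => c.2.1) he
              simpa [pvEmb] using this
            exact h1.1 this
          · exact hm
        · -- the claimed folder name leaves the unclaimed-folder pool: the count drops
          have hlt : (folders.dedup.filter (fun f => !(st.1.insert p0.1 p0.2).contains f)).length
              < (folders.dedup.filter (fun f => !st.1.contains f)).length := by
            refine pvFilterLen_lt _ _ ?_ folders.dedup p0.1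
              (List.mem_dedup.mpr ((pvMem_pvPairs folders json_ids p0).mp hp0).1)
              (by simp [hc1]) (by simp)
            intro x hx
            simp only [PySem.Dict.contains_insert, Bool.not_eq_true', Bool.or_eq_false_iff] at hx
            simp [hx.2]
          dsimp only
          omega

-- ===== VERDICT (by name: the statement is the Claim_ definition above) =====
theorem match_folder_json_ids_spec : Claim_equal_match_folder_json_ids := by
  intro folders json_ids _
  unfold Spec_match_folder_json_ids match_folder_json_ids match_folder_json_ids_alt
  rw [pvCands_eq folders json_ids]
  refine Eq.trans (congrArg (fun st : PySem.Dict String String × PySem.Dict String String =>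
      (st.1.items, st.2.items))
    (pvSel_eq folders json_ids
      (PySem.List.sorted ((pvPairs folders json_ids).map pvEmb) pvKey3)
      folders.length (PySem.Dict.empty, PySem.Dict.empty) ?_ ?_ ?_ ?_)) rfl
  · exact PySem.List.sorted_pairwise _ _
  · intro c hcm
    obtain ⟨p, hp, he⟩ := List.mem_map.mp ((PySem.List.mem_sorted _ _ _ _).mp hcm)
    exact ⟨p, hp, he.symm⟩
  · intro p hp _
    exact (PySem.List.mem_sorted _ _ _ _).mpr (List.mem_map_of_mem hp)
  · have hemp : (folders.dedup.filter
        (fun f => !(PySem.Dict.empty : PySem.Dict String String).contains f))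
        = folders.dedup := by
      simp [PySem.Dict.contains_empty]
    rw [hemp]
    exact List.Sublist.length_le (List.dedup_sublist folders)
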